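-- pv_equiv track=rewrite | github.com/pypi-data/pypi-mirror-97 | packages/pp-cedp/pp_cedp-0.0.1-py3-none-any.whl/pp_cedp/Utils.py | convert_act_to_char
-- ===== SOURCE A (Python) =====
-- def convert_act_to_char(trace, map_dict_act_chr):
--     trace_str = ""
--     for item in trace:
--         try:
--             trace_str += map_dict_act_chr[item]
--         except KeyError:
--             map_dict_act_chr[item] = chr(len(map_dict_act_chr))
--             trace_str += map_dict_act_chr[item]
--     return trace_str
-- ===== SOURCE B (Python) =====
-- def convert_act_to_char(trace, map_dict_act_chr):
--     # collect the unmapped activities, first-occurrence order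
--     base = len(map_dict_act_chr)
--     seen = set(map_dict_act_chr)
--     news = []
--     for item in trace:
--         if item not in seen:
--             seen.add(item)
--             news.append(item)
--     # a new activity's char is determined by its rank among the new ones
--     rank = {item: i for i, item in enumerate(news)}
--     out = ''.join(map_dict_act_chr[item] if item in map_dict_act_chr
--                   else chr(base + rank[item]) for item in trace)
--     # perform the same dict mutation A does
--     for i, item in enumerate(news):
--         map_dict_act_chr[item] = chr(base + i)
--     return out
-- ===== Notes on version B (the rewrite author's own statement) =====
-- stated objective: alternative
-- what changed: B never grows a dict while emitting: one seen-set pass collects the unmapped activities into a list in first-occurrence order, each fresh char is computed as chr(base + rank) from a positional rank table built by enumerate over that list, and the dict is updated once at the end only to reproduce A's side effect, instead of A's interleaved try/except loop that assigns chr(len(dict)) at insertion time.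
import Mathlib
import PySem

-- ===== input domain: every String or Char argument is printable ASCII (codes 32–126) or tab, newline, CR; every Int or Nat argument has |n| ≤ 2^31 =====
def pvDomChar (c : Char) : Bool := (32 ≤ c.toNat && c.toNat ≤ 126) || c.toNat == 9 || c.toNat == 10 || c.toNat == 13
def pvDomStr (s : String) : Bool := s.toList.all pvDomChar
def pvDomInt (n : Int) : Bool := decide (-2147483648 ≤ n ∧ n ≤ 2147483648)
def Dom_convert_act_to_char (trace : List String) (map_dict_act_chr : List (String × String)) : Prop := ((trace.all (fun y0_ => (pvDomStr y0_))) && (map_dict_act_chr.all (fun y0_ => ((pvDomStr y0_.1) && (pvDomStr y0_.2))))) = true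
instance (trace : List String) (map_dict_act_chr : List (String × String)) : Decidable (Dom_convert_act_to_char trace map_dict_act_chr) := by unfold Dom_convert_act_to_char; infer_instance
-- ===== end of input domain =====

-- B computes each fresh char from the item's rank in the first-occurrence list of unmapped
-- activities instead of A's growing-dict-length at insertion time (objective: alternative).
-- Both Pythons mutate the dict argument identically; the theorem is about the RETURN value
-- (the dict parameter is the association list the Python dict holds on entry).
-- chr(n) is ported as Char.ofNat n (exact for the code points these inputs reach).

-- ===== PORT A =====
-- one iteration of A's loop: state = (characters of trace_str so far, the dict)
def pvAStep (p : List Char × PySem.Dict String String) (item : String) :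
    List Char × PySem.Dict String String :=
  match p.2.get? item with
  | some v => (p.1 ++ v.toList, p.2)                     -- trace_str += map_dict_act_chr[item]
  | none =>                                              -- except KeyError:
      let d' := p.2.insert item (String.ofList [Char.ofNat p.2.size])   -- dict[item] = chr(len(dict))
      (p.1 ++ (d'.getD item "").toList, d')              -- trace_str += map_dict_act_chr[item]

def convert_act_to_char (trace : List String) (map_dict_act_chr : List (String × String)) : String :=
  String.ofList (trace.foldl pvAStep ([], PySem.Dict.ofList map_dict_act_chr)).1

-- ===== PORT B =====
-- Source B's first loop: state = (seen, news); news collects unmapped activities in first-occurrence order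
def pvBScan (seen_news : PySem.Set String × List String) (item : String) :
    PySem.Set String × List String :=
  if seen_news.1.contains item then seen_news
  else (seen_news.1.add item, seen_news.2 ++ [item])

-- rank[item]: item is always a key of rank where it is looked up, so .getD 0 is exact;
-- chr(n) → Char.ofNat n.toNat (ranks and base are ≥ 0)
def convert_act_to_char_alt (trace : List String) (map_dict_act_chr : List (String × String)) : String :=
  let d := PySem.Dict.ofList map_dict_act_chr
  let base : Int := (d.size : Int)                                  -- base = len(map_dict_act_chr)
  let news := (trace.foldl pvBScan (PySem.Set.ofList d.keys, [])).2 -- seen = set(map_dict_act_chr)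
  let rank := (PySem.List.enumerate news 0).foldl                   -- {item: i for i, item in enumerate(news)}
      (fun r p => r.insert p.2 p.1) (PySem.Dict.empty : PySem.Dict String Int)
  String.ofList ((trace.map (fun item =>
    if d.contains item then (d.getD item "").toList
    else [Char.ofNat (base + rank.getD item 0).toNat])).flatten)    -- ''.join(...)

-- ===== PRECONDITION & SPEC =====
def Spec_convert_act_to_char (trace : List String) (map_dict_act_chr : List (String × String)) (out : String) : Prop := out = convert_act_to_char_alt trace map_dict_act_chr
instance (trace : List String) (map_dict_act_chr : List (String × String)) (out : String) : Decidable (Spec_convert_act_to_char trace map_dict_act_chr out) := by unfold Spec_convert_act_to_char; infer_instance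

-- ===== CLAIM (what is proved, stated in full; the proofs are below) =====
def Claim_equal_convert_act_to_char : Prop := ∀ (trace : List String) (map_dict_act_chr : List (String × String)), Dom_convert_act_to_char trace map_dict_act_chr → Spec_convert_act_to_char trace map_dict_act_chr (convert_act_to_char trace map_dict_act_chr)

-- ===== LEMMAS AND PROOFS =====

-- the one-char string A stores for the i-th new activity
def pvChrAt (base i : Nat) : String := String.ofList [Char.ofNat (base + i)]

-- proof-side view of B's first loop: the news list alone, appending when unseen
def pvNewsStep (d : PySem.Dict String String) (ns : List String) (item : String) : List String :=
  if !(d.contains item) && !(ns.contains item) then ns ++ [item] else ns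

-- step lemmas (so rewriting one step leaves the folded recursion alone)
theorem pvAStep_some (acc : List Char) (d : PySem.Dict String String) (x v : String)
    (h : d.get? x = some v) : pvAStep (acc, d) x = (acc ++ v.toList, d) := by
  unfold pvAStep; rw [h]

theorem pvAStep_none (acc : List Char) (d : PySem.Dict String String) (x : String)
    (h : d.get? x = none) :
    pvAStep (acc, d) x =
      (acc ++ ((d.insert x (String.ofList [Char.ofNat d.size])).getD x "").toList,
       d.insert x (String.ofList [Char.ofNat d.size])) := by
  unfold pvAStep; rw [h]

theorem pvNewsStep_skip (d : PySem.Dict String String) (ns : List String) (x : String)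
    (h : d.contains x = true ∨ x ∈ ns) : pvNewsStep d ns x = ns := by
  unfold pvNewsStep
  rcases h with h | h <;> simp [h]

theorem pvNewsStep_app (d : PySem.Dict String String) (ns : List String) (x : String)
    (h1 : ¬ d.contains x = true) (h2 : x ∉ ns) : pvNewsStep d ns x = ns ++ [x] := by
  unfold pvNewsStep
  simp [h1, h2]

-- the news fold only appends, so the index of an already-present element is stable
theorem pvNews_index (d : PySem.Dict String String) (l : List String) (ns : List String) (x : String)
    (h : x ∈ ns) : PySem.List.index? (l.foldl (pvNewsStep d) ns) x = PySem.List.index? ns x := by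
  induction l generalizing ns with
  | nil => rfl
  | cons y ys ih =>
      rw [List.foldl_cons]
      by_cases hc : d.contains y = true ∨ y ∈ ns
      · rw [pvNewsStep_skip d ns y hc]; exact ih ns h
      · push Not at hc
        rw [pvNewsStep_app d ns y hc.1 hc.2, ih _ (List.mem_append_left _ h),
            PySem.List.index?_append_of_mem _ h]

-- main invariant: if A's dict state is the original dict extended by the bindings recorded in ns,
-- A's remaining fold emits exactly B's chars for the remaining items (ranked in the FINAL news list)
theorem pvMain (d0 : PySem.Dict String String) (l : List String) (ns : List String)
    (acc : List Char) (dA : PySem.Dict String String)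
    (hget : ∀ k, dA.get? k = if d0.contains k then d0.get? k
                  else (PySem.List.index? ns k).map (pvChrAt d0.size))
    (hsize : dA.size = d0.size + ns.length) :
    (l.foldl pvAStep (acc, dA)).1 =
      acc ++ (l.map (fun item =>
        if d0.contains item then (d0.getD item "").toList
        else [Char.ofNat (d0.size + ((PySem.List.index? (l.foldl (pvNewsStep d0) ns) item).getD 0))])).flatten := by
  induction l generalizing ns acc dA with
  | nil => simp
  | cons x xs ih =>
      rw [List.foldl_cons, List.foldl_cons]
      by_cases hc : d0.contains x = true
      · -- already in the original dict: A finds it, news unchanged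
        cases hv : d0.get? x with
        | none =>
            rw [PySem.Dict.contains_eq_isSome_get?, hv] at hc; simp at hc
        | some v =>
            have hA : dA.get? x = some v := by rw [hget, if_pos hc, hv]
            rw [pvAStep_some _ _ _ _ hA, pvNewsStep_skip d0 ns x (Or.inl hc),
                ih ns _ dA hget hsize]
            simp [hc, PySem.Dict.getD_of_get?_eq_some d0 "" hv]
      · by_cases hm : x ∈ ns
        · -- a new activity already recorded: A finds the stored chr, news unchanged
          cases hi : PySem.List.index? ns x with
          | none => rw [PySem.List.index?_eq_none_iff] at hi; exact absurd hm hi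
          | some i =>
              have hA : dA.get? x = some (pvChrAt d0.size i) := by
                rw [hget, if_neg hc, hi]; rfl
              rw [pvAStep_some _ _ _ _ hA, pvNewsStep_skip d0 ns x (Or.inr hm),
                  ih ns _ dA hget hsize]
              have hfin : PySem.List.index? (xs.foldl (pvNewsStep d0) ns) x = some i := by
                rw [pvNews_index d0 xs ns x hm, hi]
              rw [PySem.List.index?_eq_idxOf?] at hfin
              simp [hc, hfin, pvChrAt]
        · -- genuinely fresh: A inserts chr(len), news appends x
          have hA : dA.get? x = none := by
            rw [hget, if_neg hc, (PySem.List.index?_eq_none_iff ns x).mpr hm]; rfl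
          have hcA : dA.contains x = false := by
            rw [PySem.Dict.contains_eq_isSome_get?, hA]; rfl
          set dA' := dA.insert x (String.ofList [Char.ofNat dA.size]) with hdA'
          have hself : dA'.get? x = some (pvChrAt d0.size ns.length) := by
            rw [hdA', PySem.Dict.get?_insert_self, hsize]; rfl
          have hget' : ∀ k, dA'.get? k = if d0.contains k then d0.get? k
              else (PySem.List.index? (ns ++ [x]) k).map (pvChrAt d0.size) := by
            intro k
            by_cases hk : k = x
            · subst hk
              rw [hself, if_neg hc, PySem.List.index?_append_singleton_self ns k hm]
              rfl
            · rw [hdA', PySem.Dict.get?_insert_of_ne _ _ hk, hget]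
              by_cases hkd : d0.contains k = true
              · rw [if_pos hkd, if_pos hkd]
              · rw [if_neg hkd, if_neg hkd]
                by_cases hkn : k ∈ ns
                · rw [PySem.List.index?_append_of_mem _ hkn]
                · rw [(PySem.List.index?_eq_none_iff ns k).mpr hkn,
                      (PySem.List.index?_eq_none_iff (ns ++ [x]) k).mpr (by simp [hkn, hk])]
          have hsize' : dA'.size = d0.size + (ns ++ [x]).length := by
            rw [hdA', PySem.Dict.size_insert, hcA]
            simp [hsize]
            omega
          rw [pvAStep_none _ _ _ hA, pvNewsStep_app d0 ns x hc hm]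
          rw [← hdA', ih (ns ++ [x]) _ dA' hget' hsize']
          have hfin : PySem.List.index? (xs.foldl (pvNewsStep d0) (ns ++ [x])) x = some ns.length := by
            rw [pvNews_index d0 xs _ x (by simp), PySem.List.index?_append_singleton_self ns x hm]
          have hd : dA'.getD x "" = pvChrAt d0.size ns.length :=
            PySem.Dict.getD_of_get?_eq_some _ "" hself
          rw [PySem.List.index?_eq_idxOf?] at hfin
          simp [hc, hfin, hd, pvChrAt]

-- B's scan with a seen-set computes the same news list as the proof-side pvNewsStep fold
theorem pvScan_snd (d : PySem.Dict String String) (l : List String)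
    (seen : PySem.Set String) (ns : List String)
    (hinv : ∀ x, seen.contains x = (d.contains x || ns.contains x)) :
    (l.foldl pvBScan (seen, ns)).2 = l.foldl (pvNewsStep d) ns := by
  induction l generalizing seen ns with
  | nil => rfl
  | cons y ys ih =>
      rw [List.foldl_cons, List.foldl_cons]
      by_cases hy : y ∈ seen
      · have hyc : seen.contains y = true := (PySem.Set.contains_iff _ _).mpr hy
        have hor : d.contains y = true ∨ y ∈ ns := by
          have h2 := hinv y; rw [hyc] at h2
          rcases Bool.or_eq_true_iff.mp h2.symm with h | h
          · exact Or.inl h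
          · exact Or.inr (List.contains_iff_mem.mp h)
        rw [show pvBScan (seen, ns) y = (seen, ns) from by unfold pvBScan; simp [hy],
            pvNewsStep_skip d ns y hor]
        exact ih seen ns hinv
      · have hyc : seen.contains y = false := by
          rw [Bool.eq_false_iff]; intro h; exact hy ((PySem.Set.contains_iff _ _).mp h)
        have h2 := hinv y; rw [hyc] at h2
        have hd : ¬ d.contains y = true := by
          intro h; rw [h] at h2; simp at h2
        have hn : y ∉ ns := by
          intro h; rw [List.contains_iff_mem.mpr h] at h2; simp at h2
        rw [show pvBScan (seen, ns) y = (seen.add y, ns ++ [y]) from by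
              unfold pvBScan; simp [hy],
            pvNewsStep_app d ns y hd hn]
        apply ih
        intro x
        by_cases hx : x = y
        · subst hx
          have ha : (seen.add x).contains x = true :=
            (PySem.Set.contains_iff _ _).mpr ((PySem.Set.mem_add _ _ _).mpr (Or.inr rfl))
          have hb : (ns ++ [x]).contains x = true := List.contains_iff_mem.mpr (by simp)
          rw [ha, hb]; simp
        · have ha : (seen.add y).contains x = seen.contains x := by
            cases hs : seen.contains x with
            | true =>
                exact (PySem.Set.contains_iff _ _).mpr
                  ((PySem.Set.mem_add _ _ _).mpr (Or.inl ((PySem.Set.contains_iff _ _).mp hs)))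
            | false =>
                rw [Bool.eq_false_iff]; intro h
                rcases (PySem.Set.mem_add _ _ _).mp ((PySem.Set.contains_iff _ _).mp h) with h' | h'
                · rw [(PySem.Set.contains_iff _ _).mpr h'] at hs; cases hs
                · exact hx h'
          have hb : (ns ++ [y]).contains x = ns.contains x := by
            cases hs : ns.contains x with
            | true =>
                exact List.contains_iff_mem.mpr
                  (List.mem_append_left _ (List.contains_iff_mem.mp hs))
            | false =>
                rw [Bool.eq_false_iff]; intro h
                rcases List.mem_append.mp (List.contains_iff_mem.mp h) with h' | h'
                · rw [List.contains_iff_mem.mpr h'] at hs; cases hs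
                · simp at h'; exact hx h'
          rw [ha, hb, hinv x]

-- the news fold never introduces a duplicate
theorem pvNews_nodup (d : PySem.Dict String String) (l : List String) (ns : List String)
    (h : ns.Nodup) : (l.foldl (pvNewsStep d) ns).Nodup := by
  induction l generalizing ns with
  | nil => exact h
  | cons y ys ih =>
      rw [List.foldl_cons]
      by_cases hc : d.contains y = true ∨ y ∈ ns
      · rw [pvNewsStep_skip d ns y hc]; exact ih ns h
      · push Not at hc
        rw [pvNewsStep_app d ns y hc.1 hc.2]
        refine ih _ ?_
        simp [List.nodup_append, h]
        intro a ha hay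
        exact hc.2 (hay ▸ ha)

-- the rank dict built from enumerate(news) is exactly positional lookup in news
theorem pvRank_get? (news : List String) (hnd : news.Nodup) (x : String) :
    ((PySem.List.enumerate news 0).foldl (fun r p => r.insert p.2 p.1)
        (PySem.Dict.empty : PySem.Dict String Int)).get? x
      = (PySem.List.index? news x).map (fun i => (i : Int)) := by
  have hfresh : ∀ a ∈ PySem.List.enumerate news 0,
      (PySem.Dict.empty : PySem.Dict String Int).contains a.2 = false := by
    intro a _; exact PySem.Dict.contains_empty _
  have hnodup : ((PySem.List.enumerate news 0).map (·.2)).Nodup := by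
    rw [PySem.List.map_snd_enumerate]; exact hnd
  have hitems : ((PySem.List.enumerate news 0).foldl (fun r p => r.insert p.2 p.1)
      (PySem.Dict.empty : PySem.Dict String Int)).items
      = (PySem.Dict.empty : PySem.Dict String Int).items
        ++ (PySem.List.enumerate news 0).map (fun p => (p.2, p.1)) :=
    PySem.Dict.items_foldl_insert_fresh _ _ _ _ hfresh hnodup
  set rank := (PySem.List.enumerate news 0).foldl (fun r p => r.insert p.2 p.1)
      (PySem.Dict.empty : PySem.Dict String Int) with hrank
  have hkeys : rank.keys = news := by
    simp only [PySem.Dict.keys, hitems]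
    rw [show (PySem.Dict.empty : PySem.Dict String Int).items = [] from rfl]
    simp [List.map_map, Function.comp_def]
  cases hi : PySem.List.index? news x with
  | none =>
      have hxm : x ∉ news := (PySem.List.index?_eq_none_iff _ _).mp hi
      have hg : rank.get? x = none := by
        rw [PySem.Dict.get?_eq_none_iff_not_mem_keys, hkeys]; exact hxm
      simp [hg]
  | some i =>
      obtain ⟨hk, hx, -⟩ := PySem.List.getElem_of_index?_eq_some hi
      have hmem : ((x, (i : Int)) : String × Int) ∈ rank.items := by
        rw [hitems]
        apply List.mem_append_right
        apply List.mem_map.mpr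
        refine ⟨((i : Int), x), ?_, rfl⟩
        rw [PySem.List.mem_enumerate_iff]
        exact ⟨i, hk, by simp [hx]⟩
      have hg : rank.get? x = some (i : Int) :=
        PySem.Dict.get?_of_mem_items rank hmem (hkeys ▸ hnd)
      simp [hg]


-- ===== VERDICT (by name: the statement is the Claim_ definition above) =====
theorem convert_act_to_char_spec : Claim_equal_convert_act_to_char := by
  intro trace m _
  unfold Spec_convert_act_to_char convert_act_to_char convert_act_to_char_alt
  have h1 : ∀ k, (PySem.Dict.ofList m).get? k =
      if (PySem.Dict.ofList m).contains k then (PySem.Dict.ofList m).get? k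
      else (PySem.List.index? ([] : List String) k).map (pvChrAt (PySem.Dict.ofList m).size) := by
    intro k
    by_cases hk : (PySem.Dict.ofList m).contains k = true
    · rw [if_pos hk]
    · rw [if_neg hk]
      cases h : (PySem.Dict.ofList m).get? k with
      | none => rfl
      | some v =>
          rw [PySem.Dict.contains_eq_isSome_get?, h] at hk; simp at hk
  rw [pvMain (PySem.Dict.ofList m) trace [] [] _ h1 (by simp)]
  set d := PySem.Dict.ofList m with hd
  have hscan : (trace.foldl pvBScan (PySem.Set.ofList d.keys, [])).2
      = trace.foldl (pvNewsStep d) [] := by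
    apply pvScan_snd
    intro x
    have hkc : (PySem.Set.ofList d.keys).contains x = d.contains x := by
      rw [PySem.Dict.contains_eq_decide_mem_keys]
      by_cases hm : x ∈ d.keys
      · rw [(PySem.Set.contains_iff _ _).mpr ((PySem.Set.mem_ofList _ _).mpr hm)]
        simp [hm]
      · have hf : (PySem.Set.ofList d.keys).contains x = false := by
          rw [Bool.eq_false_iff]; intro h
          exact hm ((PySem.Set.mem_ofList _ _).mp ((PySem.Set.contains_iff _ _).mp h))
        rw [hf]; simp [hm]
    rw [hkc]; simp
  simp only [hscan]
  have hnd : (trace.foldl (pvNewsStep d) []).Nodup := pvNews_nodup d trace [] (by simp)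
  congr 1
  simp only [List.nil_append]
  refine congrArg List.flatten ?_
  apply List.map_congr_left
  intro item _
  by_cases hc : d.contains item = true
  · simp [hc]
  · simp only [hc, Bool.false_eq_true, if_false]
    rw [PySem.Dict.getD_eq_get?_getD, pvRank_get? _ hnd]
    cases hi : PySem.List.index? (trace.foldl (pvNewsStep d) []) item with
    | none => simp
    | some i => simp [Int.toNat_add]
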